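-- pv_equiv track=rewrite | github.com/andebetT/CODE-Lib | module1/draw_ssocles_triange.py | draw_isosceles_triangle
-- ===== SOURCE A (Python) =====
-- def draw_isosceles_triangle(h, b):
--     if b % 2 != 1 or h <= 0:
--         return None
--
--     triangle = []
--     for i in range(h):
--         row = [0] * b
--         start = (b - 1) // 2 - i
--         end = (b - 1) // 2 + i + 1
--         if start < 0 or end > b:
--             return None
--         row[start:end] = [1] * (end - start)
--         triangle.append(row)
--     return triangle
-- ===== SOURCE B (Python) =====
-- def draw_isosceles_triangle(h, b):
--     if b % 2 != 1 or h <= 0: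
--         return None
--     c = (b - 1) // 2
--     if h - 1 > c:
--         return None
--     # grow the triangle incrementally: each row is the previous row
--     # widened by one 1 on each side
--     row = [0] * b
--     triangle = []
--     for i in range(h):
--         row = row.copy()
--         row[c - i] = 1
--         row[c + i] = 1
--         triangle.append(row)
--     return triangle
-- ===== Notes on version B (the rewrite author's own statement) =====
-- stated objective: alternative
-- what changed: B validates once up front with a closed-form guard (h-1 > (b-1)//2) instead of A's mid-loop early return, and builds the grid incrementally: each row is derived from the previous row by two point updates (widening the run of 1s by one cell on each side), instead of A's per-row from-scratch construction with slice assignment.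
import Mathlib
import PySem

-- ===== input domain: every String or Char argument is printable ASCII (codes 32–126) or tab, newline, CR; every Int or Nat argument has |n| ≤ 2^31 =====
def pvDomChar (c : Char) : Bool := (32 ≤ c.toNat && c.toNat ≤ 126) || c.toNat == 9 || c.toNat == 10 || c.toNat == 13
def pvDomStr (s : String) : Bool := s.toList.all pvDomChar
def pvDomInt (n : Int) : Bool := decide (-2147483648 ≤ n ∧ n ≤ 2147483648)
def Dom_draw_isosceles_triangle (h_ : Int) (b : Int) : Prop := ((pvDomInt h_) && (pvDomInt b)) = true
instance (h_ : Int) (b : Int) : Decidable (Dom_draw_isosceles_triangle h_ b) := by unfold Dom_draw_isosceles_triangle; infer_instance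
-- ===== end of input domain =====

-- B validates once with a closed-form guard and grows the triangle incrementally
-- (each row = previous row widened by two point updates), instead of A's mid-loop
-- early return and per-row slice assignment (objective: alternative).

-- ===== PORT A =====
-- the body of A's `for i in range(h)` loop, with early return = Option; fuel = remaining iterations.
-- `row[start:end] = [1]*(end-start)` with 0 ≤ start ≤ end ≤ b is exactly take/replicate/drop.
def pvALoop (b : Int) (i : Int) : Nat → Option (List (List Int))
  | 0 => some []
  | Nat.succ n =>
    let start := PySem.Int.floordiv (b - 1) 2 - i
    let stop := PySem.Int.floordiv (b - 1) 2 + i + 1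
    if start < 0 ∨ stop > b then none
    else
      let row := (List.replicate b.toNat (0 : Int)).take start.toNat
                 ++ List.replicate (stop - start).toNat 1
                 ++ (List.replicate b.toNat (0 : Int)).drop stop.toNat
      (pvALoop b (i + 1) n).map (fun rest => row :: rest)

def draw_isosceles_triangle (h_ : Int) (b : Int) : Option (List (List Int)) :=
  if PySem.Int.mod b 2 ≠ 1 ∨ h_ ≤ 0 then none
  else pvALoop b 0 h_.toNat

-- ===== PORT B =====
-- B's loop body: copy the previous row, set cells c-i and c+i to 1, append.
-- `row[c-i] = 1` / `row[c+i] = 1` are pySetD; under B's guard both indices are in range.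
def pvBStep (c : Int) (st : List Int × List (List Int)) (i : Int) : List Int × List (List Int) :=
  let row := PySem.List.pySetD (PySem.List.pySetD st.1 (c - i) 1) (c + i) 1
  (row, st.2 ++ [row])

def draw_isosceles_triangle_alt (h_ : Int) (b : Int) : Option (List (List Int)) :=
  if PySem.Int.mod b 2 ≠ 1 ∨ h_ ≤ 0 then none
  else
    let c := PySem.Int.floordiv (b - 1) 2
    if h_ - 1 > c then none
    else
      some (((PySem.List.pyRange 0 h_ 1).foldl (pvBStep c)
              (List.replicate b.toNat (0 : Int), [])).2)

-- ===== PRECONDITION & SPEC =====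
def Spec_draw_isosceles_triangle (h_ : Int) (b : Int) (out : Option (List (List Int))) : Prop := out = draw_isosceles_triangle_alt h_ b
instance (h_ : Int) (b : Int) (out : Option (List (List Int))) : Decidable (Spec_draw_isosceles_triangle h_ b out) := by unfold Spec_draw_isosceles_triangle; infer_instance

-- ===== CLAIM =====
def Claim_equal_draw_isosceles_triangle : Prop := ∀ (h_ : Int) (b : Int), Dom_draw_isosceles_triangle h_ b → Spec_draw_isosceles_triangle h_ b (draw_isosceles_triangle h_ b)

-- ===== LEMMAS AND PROOFS =====

-- the common row shape: (c - i) zeros, (2i + 1) ones, (c - i) zeros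
def pvRow (c i : Int) : List Int :=
  List.replicate (c - i).toNat (0 : Int) ++ List.replicate (2 * i + 1).toNat 1
    ++ List.replicate (c - i).toNat 0

lemma pv_floordiv_two_mul (c : Int) : PySem.Int.floordiv (2 * c + 1 - 1) 2 = c := by
  rw [PySem.Int.floordiv_eq_ediv_of_pos (by omega)]
  omega

lemma pvRow_length (c i : Int) (h0 : 0 ≤ i) (hic : i ≤ c) :
    (pvRow c i).length = (2 * c + 1).toNat := by
  simp [pvRow]; omega

lemma pvRow_get (c i : Int) (h0 : 0 ≤ i) (hic : i ≤ c) (j : Nat)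
    (hj : j < (pvRow c i).length) :
    (pvRow c i)[j] = if (c - i).toNat ≤ j ∧ j < (c + i + 1).toNat then 1 else 0 := by
  rw [pvRow_length c i h0 hic] at hj
  simp only [pvRow, List.getElem_append, List.length_append, List.length_replicate,
    List.getElem_replicate]
  split_ifs <;> omega

-- A's slice-assigned row equals pvRow
lemma pvARow_eq (c i : Int) (h0 : 0 ≤ i) (hic : i ≤ c) :
    (List.replicate (2 * c + 1).toNat (0 : Int)).take (c - i).toNat
      ++ List.replicate ((c + i + 1) - (c - i)).toNat 1
      ++ (List.replicate (2 * c + 1).toNat (0 : Int)).drop (c + i + 1).toNat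
    = pvRow c i := by
  unfold pvRow
  rw [List.take_replicate, List.drop_replicate]
  rw [show min (c - i).toNat (2 * c + 1).toNat = (c - i).toNat by omega,
      show ((c + i + 1) - (c - i)).toNat = (2 * i + 1).toNat by omega,
      show (2 * c + 1).toNat - (c + i + 1).toNat = (c - i).toNat by omega]

-- B's two point updates widen pvRow c (i-1) into pvRow c i
lemma pvRow_succ (c i : Int) (h1 : 1 ≤ i) (hic : i ≤ c) :
    PySem.List.pySetD (PySem.List.pySetD (pvRow c (i - 1)) (c - i) 1) (c + i) 1
      = pvRow c i := by
  rw [PySem.List.pySetD_of_nonneg _ _ (by omega : (0:Int) ≤ c - i),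
      PySem.List.pySetD_of_nonneg _ _ (by omega : (0:Int) ≤ c + i)]
  apply List.ext_getElem
  · simp [pvRow_length c (i - 1) (by omega) (by omega), pvRow_length c i (by omega) hic]
  · intro j hj1 hj2
    have hlen : j < (pvRow c (i - 1)).length := by
      simpa using hj1
    rw [List.getElem_set, List.getElem_set, pvRow_get c (i - 1) (by omega) (by omega) j hlen,
        pvRow_get c i (by omega) hic j hj2]
    rw [pvRow_length c (i - 1) (by omega) (by omega)] at hlen
    split_ifs <;> omega

lemma pvRow_zero (c : Int) (hc : 0 ≤ c) :
    PySem.List.pySetD (PySem.List.pySetD (List.replicate (2 * c + 1).toNat (0 : Int)) (c - 0) 1) (c + 0) 1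
      = pvRow c 0 := by
  rw [PySem.List.pySetD_of_nonneg _ _ (by omega : (0:Int) ≤ c - 0),
      PySem.List.pySetD_of_nonneg _ _ (by omega : (0:Int) ≤ c + 0)]
  apply List.ext_getElem
  · simp [pvRow_length c 0 le_rfl hc]
  · intro j hj1 hj2
    have hlen : j < (List.replicate (2 * c + 1).toNat (0 : Int)).length := by simpa using hj1
    rw [List.getElem_set, List.getElem_set, List.getElem_replicate,
        pvRow_get c 0 le_rfl hc j hj2]
    rw [List.length_replicate] at hlen
    split_ifs <;> omega

lemma pvALoop_some (c : Int) : ∀ (n : Nat) (i : Int), 0 ≤ i → i + n ≤ c + 1 →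
    pvALoop (2 * c + 1) i n = some ((PySem.List.pyRange i (i + n) 1).map (pvRow c)) := by
  intro n
  induction n with
  | zero =>
    intro i h0 hn
    simp [pvALoop, PySem.List.pyRange_one_eq_nil (le_refl i)]
  | succ n ih =>
    intro i h0 hn
    have hic : i ≤ c := by push_cast at hn; omega
    simp only [pvALoop, pv_floordiv_two_mul]
    rw [if_neg (by push_neg; constructor <;> omega)]
    rw [ih (i + 1) (by omega) (by push_cast at hn ⊢; omega)]
    rw [pvARow_eq c i h0 hic]
    have harg : (i + ((n + 1 : Nat) : Int)) = (i + 1) + (n : Int) := by push_cast; ring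
    rw [harg, PySem.List.pyRange_one_cons (by omega : i < (i + 1) + (n : Int))]
    simp

lemma pvALoop_none (c : Int) : ∀ (n : Nat) (i : Int), 0 ≤ i → c + 1 < i + (n + 1) →
    pvALoop (2 * c + 1) i (n + 1) = none := by
  intro n
  induction n with
  | zero =>
    intro i h0 hn
    simp only [pvALoop, pv_floordiv_two_mul]
    rw [if_pos (by left; push_cast at hn; omega)]
  | succ n ih =>
    intro i h0 hn
    by_cases hic : c < i
    · simp only [pvALoop, pv_floordiv_two_mul]
      rw [if_pos (by left; omega)]
    · show (if _ then _ else _) = none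
      simp only [pv_floordiv_two_mul]
      rw [if_neg (by push_neg; constructor <;> omega)]
      rw [ih (i + 1) (by omega) (by push_cast at hn ⊢; omega)]
      rfl

-- B's fold invariant: starting from row pvRow c (i-1), iterating i .. i+n appends pvRow c i, …
lemma pvBfold (c : Int) : ∀ (n : Nat) (i : Int) (acc : List (List Int)), 1 ≤ i → i + n ≤ c + 1 →
    (PySem.List.pyRange i (i + n) 1).foldl (pvBStep c) (pvRow c (i - 1), acc)
      = (pvRow c (i + n - 1), acc ++ (PySem.List.pyRange i (i + n) 1).map (pvRow c)) := by
  intro n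
  induction n with
  | zero =>
    intro i acc h1 hn
    simp [PySem.List.pyRange_one_eq_nil (le_refl i)]
  | succ n ih =>
    intro i acc h1 hn
    have hic : i ≤ c := by push_cast at hn; omega
    have harg : (i + ((n + 1 : Nat) : Int)) = (i + 1) + (n : Int) := by push_cast; ring
    rw [harg, PySem.List.pyRange_one_cons (by omega : i < (i + 1) + (n : Int))]
    have hstep : pvBStep c (pvRow c (i - 1), acc) i = (pvRow c i, acc ++ [pvRow c i]) := by
      simp only [pvBStep, pvRow_succ c i h1 hic]
    rw [List.foldl_cons, hstep]
    have ihh := ih (i + 1) (acc ++ [pvRow c i]) (by omega) (by push_cast at hn ⊢; omega)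
    rw [show (i + 1 - 1 : Int) = i by ring] at ihh
    rw [ihh]
    simp

-- ===== VERDICT =====
theorem draw_isosceles_triangle_spec : Claim_equal_draw_isosceles_triangle := by
  intro h_ b _
  unfold Spec_draw_isosceles_triangle draw_isosceles_triangle draw_isosceles_triangle_alt
  by_cases hg : PySem.Int.mod b 2 ≠ 1 ∨ h_ ≤ 0
  · rw [if_pos hg, if_pos hg]
  · rw [if_neg hg, if_neg hg]
    push_neg at hg
    obtain ⟨hmod, hpos⟩ := hg
    rw [PySem.Int.mod_eq_emod_of_pos (by omega)] at hmod
    have hb : b = 2 * PySem.Int.floordiv (b - 1) 2 + 1 := by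
      rw [PySem.Int.floordiv_eq_ediv_of_pos (by omega)]
      omega
    set c := PySem.Int.floordiv (b - 1) 2 with hc
    have hn : ((h_.toNat : Int)) = h_ := Int.toNat_of_nonneg (by omega)
    by_cases hsz : h_ - 1 > c
    · rw [if_pos hsz, hb]
      obtain ⟨m, hm⟩ : ∃ m, h_.toNat = m + 1 := ⟨h_.toNat - 1, by omega⟩
      rw [hm, pvALoop_none c m 0 le_rfl (by omega)]
    · rw [if_neg hsz, hb]
      push_neg at hsz
      have hcnn : 0 ≤ c := by omega
      rw [pvALoop_some c h_.toNat 0 le_rfl (by omega)]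
      rw [show (0 : Int) + ((h_.toNat : Nat) : Int) = h_ by omega]
      rw [PySem.List.pyRange_one_cons (by omega : (0 : Int) < h_)]
      rw [List.foldl_cons,
          show pvBStep c (List.replicate (2 * c + 1).toNat (0 : Int), []) 0
              = (pvRow c 0, [] ++ [pvRow c 0]) by
            simp only [pvBStep, pvRow_zero c hcnn]]
      have ihh := pvBfold c (h_ - 1).toNat 1 ([] ++ [pvRow c 0]) le_rfl (by omega)
      rw [show ((1 : Int) - 1) = 0 by ring,
          show (1 : Int) + (((h_ - 1).toNat : Nat) : Int) = h_ by omega] at ihh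
      rw [show ((0 : Int) + 1) = 1 by ring, ihh]
      simp
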